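-- pv_equiv track=rewrite | github.com/wesley1001/thsdk | src/thsdk/examples/_helpers.py | _group_codes_by_market
-- ===== SOURCE A (Python) =====
-- def _group_codes_by_market(codes: list[str]) -> dict[str, list[str]]:
--     grouped: dict[str, list[str]] = {}
--     for raw_code in codes:
--         code = str(raw_code).strip().upper()
--         if len(code) < 5:
--             continue
--         grouped.setdefault(code[:4], []).append(code)
--     return grouped
-- ===== SOURCE B (Python) =====
-- def _group_codes_by_market(codes: list[str]) -> dict[str, list[str]]:
--     pairs = [(c[:4], c) for c in (str(raw).strip().upper() for raw in codes) if len(c) >= 5]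
--     prefixes = list(dict.fromkeys(p for p, _ in pairs))
--     return {p: [c for q, c in pairs if q == p] for p in prefixes}
-- ===== Notes on version B (the rewrite author's own statement) =====
-- stated objective: alternative
-- what changed: Replaces A's single-pass setdefault-append dict build with a pipeline: clean and filter the codes into (prefix, code) pairs once, take the ordered dedup of the prefixes, then build the dict by one per-prefix filter of the pair list.
import Mathlib
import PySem

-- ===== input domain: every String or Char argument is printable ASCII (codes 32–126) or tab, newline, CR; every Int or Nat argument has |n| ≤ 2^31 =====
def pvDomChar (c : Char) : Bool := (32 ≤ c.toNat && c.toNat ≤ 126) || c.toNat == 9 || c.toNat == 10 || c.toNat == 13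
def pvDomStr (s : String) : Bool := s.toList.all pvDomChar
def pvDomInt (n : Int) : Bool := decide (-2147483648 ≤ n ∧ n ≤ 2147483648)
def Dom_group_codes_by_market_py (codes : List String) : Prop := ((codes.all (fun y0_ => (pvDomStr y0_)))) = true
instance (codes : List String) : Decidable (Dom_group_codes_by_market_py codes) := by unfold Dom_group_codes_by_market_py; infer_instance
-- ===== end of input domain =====

-- B replaces A's single-pass setdefault-append loop by a pipeline (clean+filter once, ordered prefix dedup, per-prefix filter): an alternative decomposition, not faster.

-- ===== PORT A =====
-- str(c).strip().upper()
def pvClean (raw : String) : String := PySem.Str.upper (PySem.Str.strip raw)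
-- code[:4]
def pvPref4 (s : String) : String := PySem.Str.slice s none (some 4)

def group_codes_by_market_py (codes : List String) : List (String × List String) :=
  (codes.foldl
    (fun (grouped : PySem.Dict String (List String)) raw =>
      let code := pvClean raw
      if PySem.Str.len code < 5 then grouped
      else grouped.modify (pvPref4 code) [] (· ++ [code]))  -- grouped.setdefault(code[:4], []).append(code)
    PySem.Dict.empty).items

-- ===== PORT B =====
def group_codes_by_market_py_alt (codes : List String) : List (String × List String) :=
  let pairs := ((codes.map pvClean).filter (fun c => 5 ≤ PySem.Str.len c)).map (fun c => (pvPref4 c, c))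
  let prefixes := PySem.List.dedup (pairs.map (·.1))
  prefixes.map (fun p => (p, (pairs.filter (fun q => q.1 == p)).map (·.2)))

-- ===== PRECONDITION & SPEC =====
def Spec_group_codes_by_market_py (codes : List String) (out : List (String × List String)) : Prop := out = group_codes_by_market_py_alt codes
instance (codes : List String) (out : List (String × List String)) : Decidable (Spec_group_codes_by_market_py codes out) := by unfold Spec_group_codes_by_market_py; infer_instance

-- ===== CLAIM (what is proved, stated in full; the proofs are below) =====
def Claim_equal_group_codes_by_market_py : Prop := ∀ (codes : List String), Dom_group_codes_by_market_py codes → Spec_group_codes_by_market_py codes (group_codes_by_market_py codes)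

-- ===== LEMMAS AND PROOFS =====

-- A's grouping dict looked up at k holds exactly the cleaned codes with prefix k, in order.
theorem pv_getD_group (l : List String) (k : String) :
    (l.foldl (fun (d : PySem.Dict String (List String)) c => d.modify (pvPref4 c) [] (· ++ [c])) PySem.Dict.empty).getD k []
      = l.filter (fun c => pvPref4 c == k) := by
  have h : l.foldl (fun (d : PySem.Dict String (List String)) c => d.modify (pvPref4 c) [] (· ++ [c])) PySem.Dict.empty
      = (l.map (fun c => (pvPref4 c, c))).foldl (fun d p => d.modify p.1 [] (· ++ [p.2])) PySem.Dict.empty := by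
    rw [List.foldl_map]
  rw [h, PySem.Dict.getD_foldl_modify_append]
  simp [List.filter_map, Function.comp_def]

-- Items of A's grouping dict = ordered-dedup of prefixes, each paired with its filtered group.
theorem pv_items_group (l : List String) :
    (l.foldl (fun (d : PySem.Dict String (List String)) c => d.modify (pvPref4 c) [] (· ++ [c])) PySem.Dict.empty).items
      = (PySem.List.dedup (l.map pvPref4)).map (fun p => (p, l.filter (fun c => pvPref4 c == p))) := by
  have hnd := PySem.Dict.nodup_keys_foldl_modify_key l pvPref4 [] (fun _ c => (· ++ [c])) PySem.Dict.empty (by simp)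
  rw [PySem.Dict.items_eq_map_keys _ hnd []]
  rw [PySem.Dict.keys_foldl_modify_key]
  have hk : PySem.Set.update (PySem.Dict.empty : PySem.Dict String (List String)).keys (l.map pvPref4)
      = PySem.List.dedup (l.map pvPref4) := by
    simp [PySem.Set.update, PySem.List.dedup_eq_ofList, PySem.Set.ofList_eq_foldl]
  rw [hk]
  exact List.map_congr_left (fun k _ => by rw [pv_getD_group])

theorem pv_main (codes : List String) :
    group_codes_by_market_py codes = group_codes_by_market_py_alt codes := by
  unfold group_codes_by_market_py group_codes_by_market_py_alt
  have h1 : codes.foldl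
      (fun (grouped : PySem.Dict String (List String)) raw =>
        let code := pvClean raw
        if PySem.Str.len code < 5 then grouped
        else grouped.modify (pvPref4 code) [] (· ++ [code]))
      PySem.Dict.empty
      = (codes.map pvClean).foldl
        (fun d c => if 5 ≤ PySem.Str.len c then d.modify (pvPref4 c) [] (· ++ [c]) else d)
        PySem.Dict.empty := by
    rw [List.foldl_map]
    apply PySem.List.foldl_congr_mem
    intro d c _
    show (if PySem.Str.len (pvClean c) < 5 then d
          else d.modify (pvPref4 (pvClean c)) [] fun x => x ++ [pvClean c]) = _
    by_cases h : PySem.Str.len (pvClean c) < 5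
    · rw [if_pos h, if_neg (by omega)]
    · rw [if_neg h, if_pos (by omega)]
  rw [h1, PySem.List.foldl_ite_eq_foldl_filter, pv_items_group]
  simp [List.map_map, List.filter_map, Function.comp_def]

-- ===== VERDICT (by name: the statement is the Claim_ definition above) =====
theorem group_codes_by_market_py_spec : Claim_equal_group_codes_by_market_py := by
  intro codes _
  exact pv_main codes
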